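-- pv_equiv track=rewrite | github.com/niyoufei/ZhiFei_BizSystem | app/engine/v2_scorer.py | _count_hit_terms
-- ===== SOURCE A (Python) =====
-- from typing import Any, Dict, List, Tuple
--
-- def _count_hit_terms(text: str, terms: List[str]) -> int:
--     lower = text.lower()
--     seen: set[str] = set()
--     for term in terms:
--         t = str(term or "").strip().lower()
--         if t and t in lower:
--             seen.add(t)
--     return len(seen)
-- ===== SOURCE B (Python) =====
-- def _count_hit_terms(text, terms):
--     lower = text.lower()
--     cands = {str(term or "").strip().lower() for term in terms}
--     cands.discard("")
--     lengths = {len(t) for t in cands}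
--     substrs = {lower[j:j+L] for L in lengths for j in range(len(lower))}
--     return sum(1 for t in cands if t in substrs)
-- ===== Notes on version B (the rewrite author's own statement) =====
-- stated objective: faster
-- what changed: B dedupes the normalized terms once, builds a hash set of every substring of the text at the candidate lengths, and counts candidates by set lookup, removing A's per-term scan of the whole text (O(|terms|*|text|) -> O(|text|*#distinct lengths + sum of term lengths)).
import Mathlib
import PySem

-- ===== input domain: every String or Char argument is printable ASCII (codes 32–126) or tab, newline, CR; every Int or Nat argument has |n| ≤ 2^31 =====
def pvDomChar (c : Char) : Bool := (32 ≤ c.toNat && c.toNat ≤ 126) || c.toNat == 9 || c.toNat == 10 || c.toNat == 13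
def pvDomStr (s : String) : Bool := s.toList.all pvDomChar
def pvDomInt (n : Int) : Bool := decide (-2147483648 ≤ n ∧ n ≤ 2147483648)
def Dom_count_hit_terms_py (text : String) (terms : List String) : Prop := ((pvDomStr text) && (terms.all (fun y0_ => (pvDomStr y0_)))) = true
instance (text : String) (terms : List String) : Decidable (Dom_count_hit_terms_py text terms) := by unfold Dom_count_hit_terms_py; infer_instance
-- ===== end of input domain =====

-- B replaces A's per-term substring scan by a hash-set index of the text's substrings at the
-- candidate lengths (measured faster in a timing run on large inputs).
-- ===== PORT A =====
def count_hit_terms_py (text : String) (terms : List String) : Int :=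
  let lower := PySem.Str.lower text
  let seen : PySem.Set String := terms.foldl (fun seen term =>
    let t := PySem.Str.lower (PySem.Str.strip (if term == "" then "" else term))
    if t != "" && PySem.Str.isIn t lower then PySem.Set.add seen t else seen) PySem.Set.empty
  (PySem.Set.len seen : Int)

-- ===== PORT B =====
-- B: dedupe the normalized terms, index every substring of the text at the candidate
-- lengths in a set, then count candidates by set membership.
def count_hit_terms_py_alt (text : String) (terms : List String) : Int :=
  let lower := PySem.Str.lower text
  let cands : PySem.Set String := PySem.Set.discard
    (PySem.Set.ofList (terms.map (fun term =>
      PySem.Str.lower (PySem.Str.strip (if term == "" then "" else term))))) ""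
  let lengths : PySem.Set Int := PySem.Set.ofList (cands.map (fun t => PySem.Str.len t))
  let substrs : PySem.Set String := PySem.Set.ofList (lengths.flatMap (fun L =>
    (List.range lower.length).map (fun (j : Nat) =>
      PySem.Str.slice lower (some (j : Int)) (some ((j : Int) + L)))))
  ((cands.countP (fun t => PySem.Set.contains substrs t) : Nat) : Int)

-- ===== PRECONDITION & SPEC =====
def Spec_count_hit_terms_py (text : String) (terms : List String) (out : Int) : Prop := out = count_hit_terms_py_alt text terms
instance (text : String) (terms : List String) (out : Int) : Decidable (Spec_count_hit_terms_py text terms out) := by unfold Spec_count_hit_terms_py; infer_instance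

-- ===== CLAIM (what is proved, stated in full; the proofs are below) =====
def Claim_equal_count_hit_terms_py : Prop := ∀ (text : String) (terms : List String), Dom_count_hit_terms_py text terms → Spec_count_hit_terms_py text terms (count_hit_terms_py text terms)

-- ===== LEMMAS AND PROOFS =====

-- a fold of conditional adds is an update with the filtered list
theorem fold_cond_add (q : String → Bool) (l : List String) (s : PySem.Set String) :
    l.foldl (fun s t => if q t then PySem.Set.add s t else s) s
      = PySem.Set.update s (l.filter q) := by
  induction l generalizing s with
  | nil => simp [PySem.Set.update]
  | cons h tl ih =>
    by_cases hq : q h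
    · simp [hq, ih, PySem.Set.update]
    · simp [hq, ih]

-- a slice of the text at any indexed length is a substring of it
theorem slice_imp_isIn (lower x : String) (j L : Nat)
    (h : PySem.Str.slice lower (some (j : Int)) (some ((j : Int) + (L : Int))) = x) :
    PySem.Str.isIn x lower = true := by
  have hx : (lower.toList.drop j).take L = x.toList := by
    have := congrArg String.toList h
    rw [PySem.Str.toList_slice] at this
    simp only [PySem.Chars.slice_eq_listSlice] at this
    rw [PySem.List.slice_natCast_add] at this
    exact this
  have hlen : x.toList.length ≤ L := by
    rw [← hx]
    exact List.length_take_le _ _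
  have hpre : x.toList <+: lower.toList.drop j := by
    rw [List.prefix_iff_eq_take]
    calc x.toList = (x.toList).take x.toList.length := by simp
      _ = ((lower.toList.drop j).take L).take x.toList.length := by rw [hx]
      _ = (lower.toList.drop j).take x.toList.length := by
            rw [List.take_take]; congr 1; omega
  rw [PySem.Str.isIn_eq, ← PySem.Chars.exists_prefix_drop_iff_isIn]
  exact ⟨j, hpre⟩

-- conversely, a nonempty substring occurs as the slice at its own length
theorem isIn_imp_slice (lower x : String) (hx : x ≠ "")
    (h : PySem.Str.isIn x lower = true) :
    ∃ j < lower.length,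
      PySem.Str.slice lower (some (j : Int)) (some ((j : Int) + (x.toList.length : Int))) = x := by
  have htl : x.toList ≠ [] := by simpa using hx
  rw [PySem.Str.isIn_eq, ← PySem.Chars.exists_prefix_drop_iff_isIn] at h
  obtain ⟨j, hj⟩ := h
  have hjlt : j < lower.toList.length := by
    by_contra hge
    rw [List.drop_eq_nil_of_le (by omega)] at hj
    exact htl (List.prefix_nil.mp hj)
  refine ⟨j, by rw [← String.length_toList]; exact hjlt, ?_⟩
  apply String.toList_inj.mp
  rw [PySem.Str.toList_slice]
  simp only [PySem.Chars.slice_eq_listSlice]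
  rw [PySem.List.slice_natCast_add]
  rw [List.prefix_iff_eq_take] at hj
  exact hj.symm

theorem len_eq_of_mem_iff (a b : List String) (ha : a.Nodup) (hb : b.Nodup)
    (h : ∀ x, x ∈ a ↔ x ∈ b) : a.length = b.length := by
  rw [← List.toFinset_card_of_nodup ha, ← List.toFinset_card_of_nodup hb]
  congr 1
  ext x
  simp [h x]

-- ===== VERDICT (by name: the statement is the Claim_ definition above) =====
set_option maxHeartbeats 1000000 in
theorem count_hit_terms_py_spec : Claim_equal_count_hit_terms_py := by
  intro text terms _
  unfold Spec_count_hit_terms_py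
  simp only [count_hit_terms_py, count_hit_terms_py_alt]
  set lower := PySem.Str.lower text with hlow
  set f : String → String :=
    fun term => PySem.Str.lower (PySem.Str.strip (if term == "" then "" else term)) with hf
  set q : String → Bool := fun t => t != "" && PySem.Str.isIn t lower with hq
  set cands : PySem.Set String :=
    PySem.Set.discard (PySem.Set.ofList (terms.map f)) "" with hcands
  set lengths : PySem.Set Int := PySem.Set.ofList (cands.map (fun t => PySem.Str.len t)) with hlens
  set substrs : PySem.Set String := PySem.Set.ofList (lengths.flatMap (fun L =>
    (List.range lower.length).map (fun (j : Nat) =>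
      PySem.Str.slice lower (some (j : Int)) (some ((j : Int) + L))))) with hsubs
  have hA : terms.foldl (fun seen term => if q (f term) then PySem.Set.add seen (f term) else seen)
        PySem.Set.empty
      = PySem.Set.update PySem.Set.empty ((terms.map f).filter q) := by
    rw [← fold_cond_add, List.foldl_map]
  rw [hA]
  have hmemc : ∀ x, x ∈ cands ↔ x ∈ terms.map f ∧ x ≠ "" := by
    intro x
    rw [hcands, PySem.Set.mem_discard, PySem.Set.mem_ofList]
  have hsubmem : ∀ x, x ∈ cands → ((x ∈ substrs) ↔ PySem.Str.isIn x lower = true) := by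
    intro x hxc
    have hxne : x ≠ "" := ((hmemc x).mp hxc).2
    rw [hsubs, PySem.Set.mem_ofList]
    constructor
    · intro hmem
      obtain ⟨L, hL, hmap⟩ := List.mem_flatMap.mp hmem
      obtain ⟨j, _, hslice⟩ := List.mem_map.mp hmap
      rw [hlens, PySem.Set.mem_ofList] at hL
      obtain ⟨t, _, hLt⟩ := List.mem_map.mp hL
      rw [← hLt, PySem.Str.len_eq] at hslice
      exact slice_imp_isIn lower x j t.length hslice
    · intro hin
      obtain ⟨j, hj, hslice⟩ := isIn_imp_slice lower x hxne hin
      refine List.mem_flatMap.mpr ⟨(x.toList.length : Int), ?_, ?_⟩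
      · rw [hlens, PySem.Set.mem_ofList]
        refine List.mem_map.mpr ⟨x, hxc, ?_⟩
        rw [PySem.Str.len_eq, String.length_toList]
      · exact List.mem_map.mpr ⟨j, List.mem_range.mpr hj, hslice⟩
  have memA : ∀ x, x ∈ PySem.Set.update PySem.Set.empty ((terms.map f).filter q)
      ↔ (x ∈ terms.map f ∧ q x = true) := by
    intro x
    rw [PySem.Set.mem_update]
    simp [PySem.Set.empty, List.mem_filter]
  have memB : ∀ x, x ∈ cands.filter (fun t => PySem.Set.contains substrs t)
      ↔ (x ∈ terms.map f ∧ q x = true) := by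
    intro x
    rw [List.mem_filter]
    constructor
    · rintro ⟨hxc, hp⟩
      rw [PySem.Set.contains_iff] at hp
      obtain ⟨hm, hne⟩ := (hmemc x).mp hxc
      refine ⟨hm, ?_⟩
      rw [hq]
      simp only [bne_iff_ne, ne_eq, Bool.and_eq_true]
      exact ⟨hne, (hsubmem x hxc).mp hp⟩
    · rintro ⟨hm, hqx⟩
      rw [hq] at hqx
      simp only [bne_iff_ne, ne_eq, Bool.and_eq_true] at hqx
      have hxc : x ∈ cands := (hmemc x).mpr ⟨hm, hqx.1⟩
      refine ⟨hxc, ?_⟩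
      rw [PySem.Set.contains_iff]
      exact (hsubmem x hxc).mpr hqx.2
  have hnA : (PySem.Set.update PySem.Set.empty ((terms.map f).filter q)).Nodup :=
    PySem.Set.nodup_update _ _ (by simp [PySem.Set.empty])
  have hnB : (cands.filter (fun t => PySem.Set.contains substrs t)).Nodup := by
    apply List.Nodup.filter
    rw [hcands]
    exact PySem.Set.nodup_discard _ _ (PySem.Set.nodup_ofList _)
  have hlen := len_eq_of_mem_iff _ _ hnA hnB (fun x => (memA x).trans (memB x).symm)
  rw [List.countP_eq_length_filter]
  simp only [PySem.Set.len]
  exact_mod_cast hlen
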